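-- pv_equiv track=rewrite | github.com/Tushar120799/CustodianAIArmy | src/mcp/mcp_config.py | get_servers_for_tools
-- ===== SOURCE A (Python) =====
-- from typing import Dict, List, Any
--
-- MCP_SERVERS: Dict[str, Dict[str, Any]] = {
--     "fetch": {
--         "name": "fetch",
--         "description": "Fetch web content from any URL",
--         "command": "uvx",
--         "args": ["mcp-server-fetch"],
--         "env": {},
--         "tools": ["fetch"],
--     },
--     "duckduckgo": {
--         "name": "duckduckgo",
--         "description": "Free web search via DuckDuckGo (no API key required)",
--         "command": "uvx",
--         "args": ["duckduckgo-mcp-server"],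
--         "env": {},
--         "tools": ["duckduckgo_web_search", "duckduckgo_news_search"],
--     },
--     "filesystem": {
--         "name": "filesystem",
--         "description": "Read and write files on the local filesystem",
--         "command": "npx",
--         "args": ["-y", "@modelcontextprotocol/server-filesystem", "."],
--         "env": {},
--         "tools": ["read_file", "write_file", "list_directory", "search_files", "create_directory"],
--     },
--     "memory": {
--         "name": "memory",
--         "description": "Persistent knowledge graph memory for agents",
--         "command": "npx",
--         "args": ["-y", "@modelcontextprotocol/server-memory"],
--         "env": {},
--         "tools": ["create_entities", "create_relations", "add_observations",
--                   "delete_entities", "delete_observations", "delete_relations",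
--                   "read_graph", "search_nodes", "open_nodes"],
--     },
--     "sequential_thinking": {
--         "name": "sequential_thinking",
--         "description": "Structured multi-step reasoning tool",
--         "command": "npx",
--         "args": ["-y", "@modelcontextprotocol/server-sequential-thinking"],
--         "env": {},
--         "tools": ["sequentialthinking"],
--     },
-- }
--
-- def get_servers_for_tools(tool_names: List[str]) -> List[str]:
--     """Return the list of MCP server names needed to provide the given tools."""
--     needed_servers = set()
--     for server_name, server_config in MCP_SERVERS.items():
--         for tool in tool_names:
--             if tool in server_config["tools"]:
--                 needed_servers.add(server_name)
--                 break
--     return list(needed_servers)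
-- ===== SOURCE B (Python) =====
-- from typing import Dict, List, Any
--
-- MCP_SERVERS: Dict[str, Dict[str, Any]] = {
--     "fetch": {
--         "name": "fetch",
--         "description": "Fetch web content from any URL",
--         "command": "uvx",
--         "args": ["mcp-server-fetch"],
--         "env": {},
--         "tools": ["fetch"],
--     },
--     "duckduckgo": {
--         "name": "duckduckgo",
--         "description": "Free web search via DuckDuckGo (no API key required)",
--         "command": "uvx",
--         "args": ["duckduckgo-mcp-server"],
--         "env": {},
--         "tools": ["duckduckgo_web_search", "duckduckgo_news_search"],
--     },
--     "filesystem": {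
--         "name": "filesystem",
--         "description": "Read and write files on the local filesystem",
--         "command": "npx",
--         "args": ["-y", "@modelcontextprotocol/server-filesystem", "."],
--         "env": {},
--         "tools": ["read_file", "write_file", "list_directory", "search_files", "create_directory"],
--     },
--     "memory": {
--         "name": "memory",
--         "description": "Persistent knowledge graph memory for agents",
--         "command": "npx",
--         "args": ["-y", "@modelcontextprotocol/server-memory"],
--         "env": {},
--         "tools": ["create_entities", "create_relations", "add_observations",
--                   "delete_entities", "delete_observations", "delete_relations",
--                   "read_graph", "search_nodes", "open_nodes"],
--     },
--     "sequential_thinking": {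
--         "name": "sequential_thinking",
--         "description": "Structured multi-step reasoning tool",
--         "command": "npx",
--         "args": ["-y", "@modelcontextprotocol/server-sequential-thinking"],
--         "env": {},
--         "tools": ["sequentialthinking"],
--     },
-- }
--
--
-- def get_servers_for_tools(tool_names: List[str]) -> List[str]:
--     """Return the list of MCP server names needed to provide the given tools."""
--     tool_to_server = {tool: name for name, cfg in MCP_SERVERS.items() for tool in cfg["tools"]}
--     needed = {tool_to_server[tool] for tool in tool_names if tool in tool_to_server}
--     return [name for name in MCP_SERVERS if name in needed]
-- ===== Notes on version B (the rewrite author's own statement) =====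
-- stated objective: faster
-- what changed: B builds an inverted index tool->server once and loops over the requested tools with a single dict lookup each (then lists the needed servers in registry order), instead of A's nested scan of every server's whole tool list against every requested tool; results are equal as a set of server names (A's list(set) order is hash order).
import Mathlib
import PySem

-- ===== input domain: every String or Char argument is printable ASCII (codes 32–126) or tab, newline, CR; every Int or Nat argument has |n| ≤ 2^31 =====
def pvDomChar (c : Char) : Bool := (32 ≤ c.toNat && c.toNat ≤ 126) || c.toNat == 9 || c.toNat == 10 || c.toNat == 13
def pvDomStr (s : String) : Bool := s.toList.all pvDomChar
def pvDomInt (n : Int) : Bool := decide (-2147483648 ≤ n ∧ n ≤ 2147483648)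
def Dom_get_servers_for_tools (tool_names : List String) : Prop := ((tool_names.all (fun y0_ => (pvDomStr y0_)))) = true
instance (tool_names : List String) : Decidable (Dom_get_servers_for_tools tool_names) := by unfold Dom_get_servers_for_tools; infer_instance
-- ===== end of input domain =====

-- B replaces A's per-request scan of every server's tool list by an inverted index tool -> server
-- queried once per requested tool (idiomatic). Both programs return list(<set of server names>);
-- Python's set iteration order is not modelled, so both ports return the needed names in the
-- deterministic MCP_SERVERS registry order (the Python outputs are compared as sets).

-- the module constant MCP_SERVERS, restricted to the fields the function reads (name ↦ tools)
def MCP_SERVERS_tools : List (String × List String) :=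
  [("fetch", ["fetch"]),
   ("duckduckgo", ["duckduckgo_web_search", "duckduckgo_news_search"]),
   ("filesystem", ["read_file", "write_file", "list_directory", "search_files", "create_directory"]),
   ("memory", ["create_entities", "create_relations", "add_observations",
               "delete_entities", "delete_observations", "delete_relations",
               "read_graph", "search_nodes", "open_nodes"]),
   ("sequential_thinking", ["sequentialthinking"])]

-- ===== PORT A =====
-- inner 'for tool in tool_names: if tool in server_config["tools"]: needed_servers.add(server_name); break'
def innerLoopA (tools : List String) (server_name : String) :
    List String → PySem.Set String → PySem.Set String
  | [], needed => needed
  | t :: rest, needed =>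
      if tools.contains t then PySem.Set.add needed server_name
      else innerLoopA tools server_name rest needed

def get_servers_for_tools (tool_names : List String) : List String :=
  MCP_SERVERS_tools.foldl
    (fun needed p => innerLoopA p.2 p.1 tool_names needed) PySem.Set.empty

-- ===== PORT B =====
-- {tool: name for name, cfg in MCP_SERVERS.items() for tool in cfg["tools"]}
def toolToServer : PySem.Dict String String :=
  MCP_SERVERS_tools.foldl
    (fun d p => p.2.foldl (fun d t => d.insert t p.1) d) PySem.Dict.empty

def get_servers_for_tools_alt (tool_names : List String) : List String :=
  let needed : PySem.Set String :=
    tool_names.foldl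
      (fun s t =>
        match PySem.Dict.get? toolToServer t with
        | some nm => PySem.Set.add s nm
        | none => s)
      PySem.Set.empty
  (MCP_SERVERS_tools.map Prod.fst).filter (fun nm => PySem.Set.contains needed nm)

-- ===== PRECONDITION & SPEC =====
def Spec_get_servers_for_tools (tool_names : List String) (out : List String) : Prop := out = get_servers_for_tools_alt tool_names
instance (tool_names : List String) (out : List String) : Decidable (Spec_get_servers_for_tools tool_names out) := by unfold Spec_get_servers_for_tools; infer_instance

-- ===== CLAIM (what is proved, stated in full; the proofs are below) =====
def Claim_equal_get_servers_for_tools : Prop := ∀ (tool_names : List String), Dom_get_servers_for_tools tool_names → Spec_get_servers_for_tools tool_names (get_servers_for_tools tool_names)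

-- ===== LEMMAS AND PROOFS =====

-- A's inner loop adds the server name iff some requested tool is in its tool list
theorem innerLoopA_eq (tools : List String) (nm : String) (ts : List String)
    (s : PySem.Set String) :
    innerLoopA tools nm ts s =
      if ts.any (fun t => tools.contains t) then PySem.Set.add s nm else s := by
  induction ts with
  | nil => simp [innerLoopA]
  | cons t rest ih =>
      simp only [innerLoopA, ih, List.any_cons, Bool.or_eq_true]
      split_ifs <;> tauto

-- B's accumulation loop is Set.ofList of the successful lookups
theorem needed_eq (g : String → Option String) (ts : List String) (s : PySem.Set String) :
    ts.foldl (fun s t => match g t with | some nm => PySem.Set.add s nm | none => s) s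
      = (ts.filterMap g).foldl PySem.Set.add s := by
  induction ts generalizing s with
  | nil => rfl
  | cons t rest ih => cases h : g t <;> simp [h, ih]

-- the 18 tool names occurring in MCP_SERVERS (proof bookkeeping)
def allToolsPV : List String :=
  ["fetch", "duckduckgo_web_search", "duckduckgo_news_search",
   "read_file", "write_file", "list_directory", "search_files", "create_directory",
   "create_entities", "create_relations", "add_observations", "delete_entities",
   "delete_observations", "delete_relations", "read_graph", "search_nodes", "open_nodes",
   "sequentialthinking"]

theorem get_toolToServer_none (t : String) (h : t ∉ allToolsPV) :
    PySem.Dict.get? toolToServer t = none := by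
  simp only [allToolsPV, List.mem_cons, List.not_mem_nil, or_false, not_or] at h
  obtain ⟨n1,n2,n3,n4,n5,n6,n7,n8,n9,n10,n11,n12,n13,n14,n15,n16,n17,n18⟩ := h
  rw [show toolToServer = PySem.Dict.mk
    [("fetch", "fetch"), ("duckduckgo_web_search", "duckduckgo"), ("duckduckgo_news_search", "duckduckgo"),
     ("read_file", "filesystem"), ("write_file", "filesystem"), ("list_directory", "filesystem"),
     ("search_files", "filesystem"), ("create_directory", "filesystem"),
     ("create_entities", "memory"), ("create_relations", "memory"), ("add_observations", "memory"),
     ("delete_entities", "memory"), ("delete_observations", "memory"), ("delete_relations", "memory"),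
     ("read_graph", "memory"), ("search_nodes", "memory"), ("open_nodes", "memory"),
     ("sequentialthinking", "sequential_thinking")] from rfl]
  simp [PySem.Dict.get?, beq_iff_eq,
    Ne.symm n1, Ne.symm n2, Ne.symm n3, Ne.symm n4, Ne.symm n5, Ne.symm n6, Ne.symm n7,
    Ne.symm n8, Ne.symm n9, Ne.symm n10, Ne.symm n11, Ne.symm n12, Ne.symm n13, Ne.symm n14,
    Ne.symm n15, Ne.symm n16, Ne.symm n17, Ne.symm n18]

-- the inverted index finds server nm on exactly nm's tools (tool lists are disjoint)
theorem get_toolToServer_some (t : String) (nm : String) (tools : List String)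
    (h : (nm, tools) ∈ MCP_SERVERS_tools) :
    (PySem.Dict.get? toolToServer t = some nm) ↔ t ∈ tools := by
  by_cases hmem : t ∈ allToolsPV
  · simp only [allToolsPV, List.mem_cons, List.not_mem_nil, or_false] at hmem
    simp only [MCP_SERVERS_tools, List.mem_cons, List.not_mem_nil, or_false,
      Prod.mk.injEq] at h
    rcases hmem with rfl|rfl|rfl|rfl|rfl|rfl|rfl|rfl|rfl|rfl|rfl|rfl|rfl|rfl|rfl|rfl|rfl|rfl <;>
      rcases h with ⟨rfl, rfl⟩|⟨rfl, rfl⟩|⟨rfl, rfl⟩|⟨rfl, rfl⟩|⟨rfl, rfl⟩ <;> decide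
  · rw [get_toolToServer_none t hmem]
    simp only [MCP_SERVERS_tools, List.mem_cons, List.not_mem_nil, or_false,
      Prod.mk.injEq] at h
    simp only [allToolsPV, List.mem_cons, List.not_mem_nil, or_false, not_or] at hmem
    rcases h with ⟨rfl, rfl⟩|⟨rfl, rfl⟩|⟨rfl, rfl⟩|⟨rfl, rfl⟩|⟨rfl, rfl⟩ <;> simp_all

-- Set.contains of B's needed set, as A's any-scan of that server's tool list
theorem contains_needed (tn : List String) (nm : String) (tools : List String)
    (h : (nm, tools) ∈ MCP_SERVERS_tools) :
    PySem.Set.contains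
        ((tn.filterMap (fun t => PySem.Dict.get? toolToServer t)).foldl PySem.Set.add
          PySem.Set.empty) nm
      = tn.any (fun t => tools.contains t) := by
  rw [Bool.eq_iff_iff]
  rw [show ((tn.filterMap (fun t => PySem.Dict.get? toolToServer t)).foldl PySem.Set.add
        PySem.Set.empty) = PySem.Set.ofList (tn.filterMap (fun t => PySem.Dict.get? toolToServer t))
      from rfl]
  simp only [PySem.Set.contains_iff, PySem.Set.mem_ofList, List.mem_filterMap,
    List.any_eq_true, List.contains_eq_mem, decide_eq_true_eq]
  constructor
  · rintro ⟨t, ht, hg⟩; exact ⟨t, ht, (get_toolToServer_some t nm tools h).mp hg⟩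
  · rintro ⟨t, ht, hg⟩; exact ⟨t, ht, (get_toolToServer_some t nm tools h).mpr hg⟩

-- ===== VERDICT (by name: the statement is the Claim_ definition above) =====
theorem get_servers_for_tools_spec : Claim_equal_get_servers_for_tools := by
  intro tn _
  unfold Spec_get_servers_for_tools get_servers_for_tools get_servers_for_tools_alt
  rw [needed_eq]
  have h1 := contains_needed tn "fetch" ["fetch"] (by decide)
  have h2 := contains_needed tn "duckduckgo" ["duckduckgo_web_search", "duckduckgo_news_search"] (by decide)
  have h3 := contains_needed tn "filesystem"
    ["read_file", "write_file", "list_directory", "search_files", "create_directory"] (by decide)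
  have h4 := contains_needed tn "memory"
    ["create_entities", "create_relations", "add_observations", "delete_entities",
     "delete_observations", "delete_relations", "read_graph", "search_nodes", "open_nodes"] (by decide)
  have h5 := contains_needed tn "sequential_thinking" ["sequentialthinking"] (by decide)
  simp only [MCP_SERVERS_tools, List.foldl_cons, List.foldl_nil, List.map_cons, List.map_nil,
    List.filter_cons, List.filter_nil, innerLoopA_eq, h1, h2, h3, h4, h5]
  generalize (tn.any fun t => List.contains ["fetch"] t) = b1
  generalize (tn.any fun t => List.contains ["duckduckgo_web_search", "duckduckgo_news_search"] t) = b2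
  generalize (tn.any fun t => List.contains
    ["read_file", "write_file", "list_directory", "search_files", "create_directory"] t) = b3
  generalize (tn.any fun t => List.contains
    ["create_entities", "create_relations", "add_observations", "delete_entities",
     "delete_observations", "delete_relations", "read_graph", "search_nodes", "open_nodes"] t) = b4
  generalize (tn.any fun t => List.contains ["sequentialthinking"] t) = b5
  cases b1 <;> cases b2 <;> cases b3 <;> cases b4 <;> cases b5 <;> decide
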